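-- pv_equiv track=rewrite | github.com/DimonRonD/Learning | eduson_49_etc.py | sums_by_quarter
-- ===== SOURCE A (Python) =====
-- def sums_by_quarter(lst):
--     counter = 0
--     tmp = []
--     temp = 0
--     for item in lst:
--         temp += int(item)
--         counter += 1
--         if counter % 3 == 0:
--             tmp.append(temp)
--             temp = 0
--     return tmp
-- ===== SOURCE B (Python) =====
-- def sums_by_quarter(lst):
--     n3 = len(lst) - len(lst) % 3
--     return [int(lst[i]) + int(lst[i + 1]) + int(lst[i + 2]) for i in range(0, n3, 3)]
-- ===== Notes on version B (the rewrite author's own statement) =====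
-- stated objective: simpler
-- what changed: Replaced the loop that threads a counter, a running temp and a mod-3 test by a stateless comprehension over the chunk start indices range(0, len-len%3, 3), summing the three elements at each start; the incomplete final group is dropped by construction instead of by leftover loop state.
import Mathlib
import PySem

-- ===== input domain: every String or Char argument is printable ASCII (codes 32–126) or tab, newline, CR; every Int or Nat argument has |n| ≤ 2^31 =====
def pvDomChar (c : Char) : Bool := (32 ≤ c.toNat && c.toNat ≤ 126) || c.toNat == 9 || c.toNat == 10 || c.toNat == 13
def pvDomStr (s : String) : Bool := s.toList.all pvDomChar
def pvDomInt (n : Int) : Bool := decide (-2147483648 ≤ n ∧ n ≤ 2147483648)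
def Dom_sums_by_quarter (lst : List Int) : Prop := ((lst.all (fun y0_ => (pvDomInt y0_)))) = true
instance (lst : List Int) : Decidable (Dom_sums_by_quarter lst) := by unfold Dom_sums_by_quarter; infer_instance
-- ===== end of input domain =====

-- B replaces A's counter/temp/mod-3 loop by a stateless comprehension over chunk start indices (objective: simpler).

-- ===== PORT A =====
-- A's loop state: (counter, tmp, temp); one fold step per list item, branches in A's order.
def sums_by_quarter (lst : List Int) : List Int :=
  (lst.foldl
    (fun (s : Int × List Int × Int) item =>
      let temp := s.2.2 + item
      let counter := s.1 + 1
      if PySem.Int.mod counter 3 = 0 then (counter, s.2.1 ++ [temp], 0)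
      else (counter, s.2.1, temp))
    (0, [], 0)).2.1

-- ===== PORT B =====
-- [int(lst[i]) + int(lst[i+1]) + int(lst[i+2]) for i in range(0, n3, 3)];
-- every index is in range for i in the range, so pyGetD's default is never read.
def sums_by_quarter_alt (lst : List Int) : List Int :=
  let n3 : Int := (lst.length : Int) - PySem.Int.mod (lst.length : Int) 3
  (PySem.List.pyRange 0 n3 3).map (fun i =>
    PySem.List.pyGetD lst i 0 + PySem.List.pyGetD lst (i + 1) 0 + PySem.List.pyGetD lst (i + 2) 0)

-- ===== PRECONDITION & SPEC =====
def Spec_sums_by_quarter (lst : List Int) (out : List Int) : Prop := out = sums_by_quarter_alt lst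
instance (lst : List Int) (out : List Int) : Decidable (Spec_sums_by_quarter lst out) := by unfold Spec_sums_by_quarter; infer_instance

-- ===== CLAIM (what is proved, stated in full; the proofs are below) =====
def Claim_equal_sums_by_quarter : Prop := ∀ (lst : List Int), Dom_sums_by_quarter lst → Spec_sums_by_quarter lst (sums_by_quarter lst)

-- ===== LEMMAS AND PROOFS =====

-- Common reference form: the list of chunk sums, three elements at a time.
def pvChunk : List Int → List Int
  | a :: b :: c :: rest => (a + b + c) :: pvChunk rest
  | _ => []

-- A's fold step, named for the invariant lemma.
def pvStepA (s : Int × List Int × Int) (item : Int) : Int × List Int × Int :=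
  let temp := s.2.2 + item
  let counter := s.1 + 1
  if PySem.Int.mod counter 3 = 0 then (counter, s.2.1 ++ [temp], 0)
  else (counter, s.2.1, temp)

theorem pvMod3 (a : Int) : PySem.Int.mod a 3 = a % 3 := by
  simp [PySem.Int.mod, Int.fmod_eq_emod]

-- Invariant of A's loop: from any state with counter ≡ 0 (mod 3) and temp = 0,
-- the loop appends exactly the chunk sums to the accumulated tmp.
theorem pvFoldA_inv : ∀ (n : Nat) (lst : List Int), lst.length ≤ n →
    ∀ (c : Int) (tmp : List Int), c % 3 = 0 →
      (lst.foldl pvStepA (c, tmp, 0)).2.1 = tmp ++ pvChunk lst := by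
  intro n
  induction n with
  | zero =>
    intro lst h c tmp _
    have : lst = [] := List.eq_nil_of_length_eq_zero (Nat.le_zero.mp h)
    subst this; simp [pvChunk]
  | succ n ih =>
    intro lst h c tmp hc
    match lst with
    | [] => simp [pvChunk]
    | [a] =>
      have h1 : (c + 1) % 3 ≠ 0 := by omega
      simp [pvStepA, pvChunk, h1]
    | [a, b] =>
      have h1 : (c + 1) % 3 ≠ 0 := by omega
      have h2 : (c + 1 + 1) % 3 ≠ 0 := by omega
      simp [pvStepA, pvChunk, h1, h2]
    | a :: b :: d :: rest =>
      have h1 : (c + 1) % 3 ≠ 0 := by omega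
      have h2 : (c + 1 + 1) % 3 ≠ 0 := by omega
      have h3 : (c + 1 + 1 + 1) % 3 = 0 := by omega
      have hlen : rest.length ≤ n := by simp at h; omega
      show ((a :: b :: d :: rest).foldl pvStepA (c, tmp, 0)).2.1 = _
      have hred : (a :: b :: d :: rest).foldl pvStepA (c, tmp, 0)
          = rest.foldl pvStepA (c + 1 + 1 + 1, tmp ++ [0 + a + b + d], 0) := by
        simp only [List.foldl, pvStepA, pvMod3, if_neg h1, if_neg h2, if_pos h3]
      rw [hred, ih rest hlen (c + 1 + 1 + 1) (tmp ++ [0 + a + b + d]) h3]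
      simp [pvChunk]

-- The chunk-count of B's range equals lst.length / 3.
theorem pvCnt_eq (L : Nat) :
    (if (0 : Int) < (L : Int) - (L : Int) % 3
      then (((L : Int) - (L : Int) % 3 - 0 + 3 - 1) / 3).toNat else 0) = L / 3 := by
  split_ifs with h <;> omega

theorem pvGetD_shift3 (a b d : Int) (l : List Int) (m : Nat) (x : Int) :
    (a :: b :: d :: l).getD (m + 3) x = l.getD m x := by
  show (a :: b :: d :: l).getD (m + 1 + 1 + 1) x = l.getD m x
  rw [List.getD_cons_succ, List.getD_cons_succ, List.getD_cons_succ]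

-- B's comprehension, rewritten over List.range, equals the chunk sums.
theorem pvRange_eq_chunk : ∀ (n : Nat) (lst : List Int), lst.length ≤ n →
    (List.range (lst.length / 3)).map (fun (k : Nat) =>
        PySem.List.pyGetD lst (0 + 3 * ((k : Nat) : Int)) 0
      + PySem.List.pyGetD lst (0 + 3 * ((k : Nat) : Int) + 1) 0
      + PySem.List.pyGetD lst (0 + 3 * ((k : Nat) : Int) + 2) 0) = pvChunk lst := by
  intro n
  induction n with
  | zero =>
    intro lst h
    have : lst = [] := List.eq_nil_of_length_eq_zero (Nat.le_zero.mp h)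
    subst this; simp [pvChunk]
  | succ n ih =>
    intro lst h
    match lst with
    | [] => simp [pvChunk]
    | [a] => simp [pvChunk]
    | [a, b] => simp [pvChunk]
    | a :: b :: d :: rest =>
      have hlen : rest.length ≤ n := by simp at h; omega
      have hdiv : (a :: b :: d :: rest).length / 3 = rest.length / 3 + 1 := by
        simp; omega
      simp only [hdiv, List.range_succ_eq_map, List.map_cons, List.map_map]
      have hhead : PySem.List.pyGetD (a :: b :: d :: rest) (0 + 3 * ((0 : Nat) : Int)) 0
          + PySem.List.pyGetD (a :: b :: d :: rest) (0 + 3 * ((0 : Nat) : Int) + 1) 0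
          + PySem.List.pyGetD (a :: b :: d :: rest) (0 + 3 * ((0 : Nat) : Int) + 2) 0
          = a + b + d := by
        have g2 : (0 : Int) + 3 * ((0 : Nat) : Int) + 2 = ((2 : Nat) : Int) := by norm_num
        have g1 : (0 : Int) + 3 * ((0 : Nat) : Int) + 1 = ((1 : Nat) : Int) := by norm_num
        have g0 : (0 : Int) + 3 * ((0 : Nat) : Int) = ((0 : Nat) : Int) := by norm_num
        rw [g2, g1, g0]
        simp only [PySem.List.pyGetD_natCast]
        rfl
      have htail : ∀ k : Nat,
          PySem.List.pyGetD (a :: b :: d :: rest) (0 + 3 * ((Nat.succ k : Nat) : Int)) 0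
            + PySem.List.pyGetD (a :: b :: d :: rest) (0 + 3 * ((Nat.succ k : Nat) : Int) + 1) 0
            + PySem.List.pyGetD (a :: b :: d :: rest) (0 + 3 * ((Nat.succ k : Nat) : Int) + 2) 0
          = PySem.List.pyGetD rest (0 + 3 * (k : Int)) 0
            + PySem.List.pyGetD rest (0 + 3 * (k : Int) + 1) 0
            + PySem.List.pyGetD rest (0 + 3 * (k : Int) + 2) 0 := by
        intro k
        have e0 : (0 : Int) + 3 * ((Nat.succ k : Nat) : Int) = ((3 * k + 3 : Nat) : Int) := by
          push_cast; ring
        have e1 : (0 : Int) + 3 * ((Nat.succ k : Nat) : Int) + 1 = ((3 * k + 4 : Nat) : Int) := by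
          push_cast; ring
        have e2 : (0 : Int) + 3 * ((Nat.succ k : Nat) : Int) + 2 = ((3 * k + 5 : Nat) : Int) := by
          push_cast; ring
        have f0 : (0 : Int) + 3 * ((k : Nat) : Int) = ((3 * k : Nat) : Int) := by push_cast; ring
        have f1 : (0 : Int) + 3 * ((k : Nat) : Int) + 1 = ((3 * k + 1 : Nat) : Int) := by
          push_cast; ring
        have f2 : (0 : Int) + 3 * ((k : Nat) : Int) + 2 = ((3 * k + 2 : Nat) : Int) := by
          push_cast; ring
        rw [e2, e1, e0, f2, f1, f0]
        simp only [PySem.List.pyGetD_natCast]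
        rw [show 3 * k + 4 = (3 * k + 1) + 3 from rfl, show 3 * k + 5 = (3 * k + 2) + 3 from rfl,
          pvGetD_shift3, pvGetD_shift3, pvGetD_shift3]
      have htl : List.map ((fun (k : Nat) =>
            PySem.List.pyGetD (a :: b :: d :: rest) (0 + 3 * ((k : Nat) : Int)) 0
          + PySem.List.pyGetD (a :: b :: d :: rest) (0 + 3 * ((k : Nat) : Int) + 1) 0
          + PySem.List.pyGetD (a :: b :: d :: rest) (0 + 3 * ((k : Nat) : Int) + 2) 0)
            ∘ Nat.succ) (List.range (rest.length / 3)) = pvChunk rest := by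
        rw [← ih rest hlen]
        refine List.map_congr_left fun k _ => ?_
        simpa [Function.comp_def] using htail k
      rw [show pvChunk (a :: b :: d :: rest) = (a + b + d) :: pvChunk rest from rfl, hhead, htl]

-- ===== VERDICT (by name: the statement is the Claim_ definition above) =====
theorem sums_by_quarter_spec : Claim_equal_sums_by_quarter := by
  intro lst _
  unfold Spec_sums_by_quarter
  have hA : sums_by_quarter lst = pvChunk lst := by
    unfold sums_by_quarter
    have hstep : (fun (s : Int × List Int × Int) item =>
        let temp := s.2.2 + item
        let counter := s.1 + 1
        if PySem.Int.mod counter 3 = 0 then (counter, s.2.1 ++ [temp], 0)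
        else (counter, s.2.1, temp)) = pvStepA := rfl
    rw [hstep, pvFoldA_inv lst.length lst (le_refl _) 0 [] (by decide)]
    simp
  have hB : sums_by_quarter_alt lst = pvChunk lst := by
    show (PySem.List.pyRange 0 ((lst.length : Int) - PySem.Int.mod (lst.length : Int) 3) 3).map
        (fun i => PySem.List.pyGetD lst i 0 + PySem.List.pyGetD lst (i + 1) 0
          + PySem.List.pyGetD lst (i + 2) 0) = pvChunk lst
    rw [pvMod3, PySem.List.pyRange_of_pos _ _ (show (0 : Int) < 3 by norm_num)]
    rw [List.map_map]
    rw [pvCnt_eq lst.length]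
    have hr := pvRange_eq_chunk lst.length lst (le_refl _)
    simpa [Function.comp_def] using hr
  rw [hA, hB]
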